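-- pv_equiv track=rewrite | github.com/gabrielgcma/tarefa1-matematica-discreta | rel_binarias.py | injetora
-- ===== SOURCE A (Python) =====
-- def injetora(relacao):
--     imagem = set()
--
--     # Adicionando cada y dos pares da relação a um set imagem,
--     # verificamos se eles já existem no set. Caso um y já exista,
--     # isso significa que existem elementos no domínio que se relacionam
--     # com o mesmo elemento no contradomínio, o que vai contra a definição
--     # de função injetora (one to one).
--     for x, y in relacao:
--         if y in imagem:
--             return False
--         else:
--             imagem.add(y)
--
--     return True
-- ===== SOURCE B (Python) =====
-- def injetora(relacao):
--     ys = [y for x, y in relacao]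
--     return len(ys) == len(set(ys))
-- ===== Notes on version B (the rewrite author's own statement) =====
-- stated objective: simpler
-- what changed: B materializes all second coordinates once and decides injectivity by comparing total count to distinct count, replacing A's per-element set probing with early return.
import Mathlib
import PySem

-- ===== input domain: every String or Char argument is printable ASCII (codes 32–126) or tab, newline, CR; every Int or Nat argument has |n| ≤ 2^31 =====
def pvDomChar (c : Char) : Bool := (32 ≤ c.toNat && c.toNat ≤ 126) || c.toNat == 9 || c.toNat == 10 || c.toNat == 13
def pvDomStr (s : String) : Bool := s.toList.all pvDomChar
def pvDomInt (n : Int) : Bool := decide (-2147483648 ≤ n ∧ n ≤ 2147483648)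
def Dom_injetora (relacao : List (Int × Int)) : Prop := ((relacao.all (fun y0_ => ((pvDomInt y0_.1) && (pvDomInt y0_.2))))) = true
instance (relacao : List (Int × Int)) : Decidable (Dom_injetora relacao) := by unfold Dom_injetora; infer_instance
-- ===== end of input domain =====

-- B replaces A's per-element set-probe loop (with early return) by building the list of all
-- second coordinates once and comparing total count to distinct count; objective: simpler.

-- ===== PORT A =====
-- the 'for x, y in relacao' loop with the set 'imagem' as accumulator
def injetoraLoop (rel : List (Int × Int)) (imagem : PySem.Set Int) : Bool :=
  match rel with
  | [] => true
  | (_, y) :: rest =>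
    if PySem.Set.contains imagem y then false
    else injetoraLoop rest (PySem.Set.add imagem y)

def injetora (relacao : List (Int × Int)) : Bool :=
  injetoraLoop relacao PySem.Set.empty

-- ===== PORT B =====
def injetora_alt (relacao : List (Int × Int)) : Bool :=
  let ys := relacao.map (fun p => p.2)
  ((ys.length : Int)) == PySem.Set.len (PySem.Set.ofList ys)

-- ===== PRECONDITION & SPEC =====
def Spec_injetora (relacao : List (Int × Int)) (out : Bool) : Prop := out = injetora_alt relacao
instance (relacao : List (Int × Int)) (out : Bool) : Decidable (Spec_injetora relacao out) := by unfold Spec_injetora; infer_instance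

-- ===== CLAIM (what is proved, stated in full; the proofs are below) =====
def Claim_equal_injetora : Prop := ∀ (relacao : List (Int × Int)), Dom_injetora relacao → Spec_injetora relacao (injetora relacao)

-- ===== LEMMAS AND PROOFS =====

lemma loop_true_iff (rel : List (Int × Int)) (s : PySem.Set Int) :
    injetoraLoop rel s = true ↔
      (rel.map (fun p => p.2)).Nodup ∧ ∀ y ∈ rel.map (fun p => p.2), y ∉ s := by
  induction rel generalizing s with
  | nil => simp [injetoraLoop]
  | cons hd tl ih =>
    obtain ⟨x, y⟩ := hd
    simp only [injetoraLoop]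
    by_cases hy : PySem.Set.contains s y
    · simp only [hy, if_true]
      have : y ∈ s := by simpa [PySem.Set.contains] using hy
      simp only [List.map_cons, List.nodup_cons]
      constructor
      · intro h; exact absurd h (by simp)
      · rintro ⟨-, hall⟩
        exact absurd this (hall y (by simp))
    · rw [if_neg hy, ih]
      have hys : y ∉ s := by simpa [PySem.Set.contains] using hy
      simp only [List.map_cons, List.nodup_cons, List.mem_cons]
      constructor
      · rintro ⟨hnd, hall⟩
        refine ⟨⟨fun hmem => ?_, hnd⟩, ?_⟩
        · have := hall y hmem
          simp [PySem.Set.add, PySem.Set.contains, hys] at this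
        · rintro z (rfl | hz)
          · exact hys
          · intro hzs
            have := hall z hz
            simp [PySem.Set.add, PySem.Set.contains, hys] at this
            exact this.1 hzs
      · rintro ⟨⟨hyn, hnd⟩, hall⟩
        refine ⟨hnd, fun z hz hzadd => ?_⟩
        simp [PySem.Set.add, PySem.Set.contains, hys] at hzadd
        rcases hzadd with hzs | rfl
        · exact hall z (Or.inr hz) hzs
        · exact hyn hz

lemma len_foldl_add_le (ys : List Int) (s : PySem.Set Int) :
    (ys.foldl PySem.Set.add s).length ≤ s.length + ys.length := by
  induction ys generalizing s with
  | nil => simp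
  | cons y tl ih =>
    simp only [List.foldl_cons, List.length_cons]
    have := ih (PySem.Set.add s y)
    have hadd : (PySem.Set.add s y).length ≤ s.length + 1 := by
      unfold PySem.Set.add; split <;> simp
    omega

lemma len_foldl_add_eq_iff (ys : List Int) (s : PySem.Set Int) :
    ((ys.foldl PySem.Set.add s).length = s.length + ys.length) ↔
      (ys.Nodup ∧ ∀ y ∈ ys, y ∉ s) := by
  induction ys generalizing s with
  | nil => simp
  | cons y tl ih =>
    simp only [List.foldl_cons, List.nodup_cons, List.mem_cons]
    by_cases hy : y ∈ s
    · have hc : PySem.Set.add s y = s := by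
        simp [PySem.Set.add, hy]
      rw [hc]
      have hle := len_foldl_add_le tl s
      simp only [List.length_cons] at *
      constructor
      · intro h; omega
      · rintro ⟨-, hall⟩; exact absurd hy (hall y (Or.inl rfl))
    · have hc : PySem.Set.add s y = s ++ [y] := by
        simp [PySem.Set.add, hy]
      rw [hc, show List.length s + (y :: tl).length = (s ++ [y]).length + tl.length from by
        simp; omega, ih]
      simp only [List.mem_append, List.mem_singleton]
      constructor
      · rintro ⟨hnd, hall⟩
        refine ⟨⟨fun hmem => ?_, hnd⟩, ?_⟩
        · exact (hall y hmem) (Or.inr rfl)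
        · rintro z (rfl | hz)
          · exact hy
          · exact fun hzs => (hall z hz) (Or.inl hzs)
      · rintro ⟨⟨hyn, hnd⟩, hall⟩
        refine ⟨hnd, fun z hz hzmem => ?_⟩
        rcases hzmem with hzs | rfl
        · exact hall z (Or.inr hz) hzs
        · exact hyn hz

lemma len_ofList_eq_iff_nodup (ys : List Int) :
    (ys.length = (PySem.Set.ofList ys).length) ↔ ys.Nodup := by
  unfold PySem.Set.ofList
  rw [show ys.length = PySem.Set.empty.length + ys.length from by simp [PySem.Set.empty], eq_comm,
    len_foldl_add_eq_iff]
  simp [PySem.Set.empty]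

lemma alt_true_iff (relacao : List (Int × Int)) :
    injetora_alt relacao = true ↔ (relacao.map (fun p => p.2)).Nodup := by
  simp only [injetora_alt, PySem.Set.len, beq_iff_eq, Nat.cast_inj]
  exact len_ofList_eq_iff_nodup _

-- ===== VERDICT (by name: the statement is the Claim_ definition above) =====
theorem injetora_spec : Claim_equal_injetora := by
  intro relacao _
  unfold Spec_injetora
  rw [Bool.eq_iff_iff]
  rw [show injetora relacao = injetoraLoop relacao PySem.Set.empty from rfl]
  rw [loop_true_iff, alt_true_iff]
  simp [PySem.Set.empty]
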